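-- pv_equiv track=rewrite | github.com/VictorO98/ADA | Tarea2/change.py | solve
-- ===== SOURCE A (Python) =====
-- INF = 9999
--
-- def solve(arreglo, x):
-- 	monedas = [5,10,20,50,100,200]
-- 	contMax = x
-- 	formas = []
-- 	formasTend = []
-- 	while contMax <= 200+x:
-- 		i, j = 5,5
-- 		numMon, numMonTend = 0, 0
-- 		copiaArr = arreglo.copy()
-- 		acumulado = contMax
-- 		devuelta = acumulado - x
-- 		while i >= 0:
-- 			if copiaArr[i] > 0 and acumulado-monedas[i] >= 0:
-- 				acumulado -= monedas[i]
-- 				copiaArr[i] -= 1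
-- 				numMon += 1
-- 			else:
-- 				i-=1
-- 		if acumulado > 0:
-- 			numMon = INF
-- 		while j >= 0:
-- 			if devuelta >= monedas[j]:
-- 				devuelta -= monedas[j]
-- 				numMonTend += 1
-- 			else:
-- 				j-=1
-- 		formas.append(numMon)
-- 		formasTend.append(numMonTend)
-- 		contMax += 5
-- 	ans = formas[0] + formasTend[0]
-- 	p = 0
-- 	while p < len(formas):
-- 		suma = formas[p] + formasTend[p]
-- 		ans = min(ans, suma)
-- 		suma = 0
-- 		p += 1
-- 	return ans
-- ===== SOURCE B (Python) =====
-- def solve(arreglo, x):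
--     coins = [5, 10, 20, 50, 100, 200]
--
--     def cost(paid):
--         rem, pay = paid, 0
--         for i in (5, 4, 3, 2, 1, 0):
--             cnt = max(0, min(rem // coins[i], arreglo[i]))
--             rem -= cnt * coins[i]
--             pay += cnt
--         if rem > 0:
--             pay = 9999
--         change, r = 0, paid - x
--         for c in (200, 100, 50, 20, 10, 5):
--             change += r // c
--             r %= c
--         return pay + change
--
--     return min(cost(x + 5 * k) for k in range(41))
-- ===== Notes on version B (the rewrite author's own statement) =====
-- stated objective: faster
-- what changed: Replaces A's one-coin-at-a-time subtraction inner loops with division-based greedy (one floor-division per denomination, capped by stock on the pay side) and A's two parallel result lists plus a final min scan with a single min over the 41 candidate paid amounts.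
import Mathlib
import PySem

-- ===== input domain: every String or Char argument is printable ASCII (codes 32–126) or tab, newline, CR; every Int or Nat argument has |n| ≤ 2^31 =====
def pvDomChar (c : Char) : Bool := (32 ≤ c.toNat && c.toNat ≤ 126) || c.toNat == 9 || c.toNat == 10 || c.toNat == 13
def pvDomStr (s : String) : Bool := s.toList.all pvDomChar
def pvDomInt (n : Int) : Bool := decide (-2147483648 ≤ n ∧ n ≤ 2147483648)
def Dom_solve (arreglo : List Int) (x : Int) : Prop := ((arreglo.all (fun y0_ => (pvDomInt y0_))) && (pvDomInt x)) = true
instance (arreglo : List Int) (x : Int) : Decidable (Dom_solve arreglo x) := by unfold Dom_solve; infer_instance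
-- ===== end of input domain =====

-- B replaces A's one-coin-at-a-time subtraction loops by division-based greedy (one // per
-- denomination) and the two parallel result lists + final scan by a single min over the 41
-- candidate paid amounts; objective: faster (A's inner loop runs once per coin paid).

-- ===== PORT A =====
-- monedas = [5,10,20,50,100,200]
def pvCoins : List Int := [5, 10, 20, 50, 100, 200]

-- inner 'while i >= 0' pay loop of A; i : Nat is Python's i (exit when it would become -1);
-- the 'i ≤ 5' conjunct is a totality guard only (i starts at 5 and only decreases);
-- list indexing is total getD — Pre_solve guarantees the index is in range.
def payLoop (copia : List Int) (acum numMon : Int) (i : Nat) : Int × Int :=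
  if h : i ≤ 5 ∧ 0 < copia.getD i 0 ∧ 0 ≤ acum - pvCoins.getD i 0 then
    payLoop (copia.set i (copia.getD i 0 - 1)) (acum - pvCoins.getD i 0) (numMon + 1) i
  else if i = 0 then (acum, numMon) else payLoop copia acum numMon (i - 1)
  termination_by (acum.toNat, i)
  decreasing_by
  · have h5 : (5:Int) ≤ pvCoins.getD i 0 := by
      obtain ⟨hi, -, -⟩ := h
      interval_cases i <;> simp [pvCoins]
    left; omega
  · right; omega

-- inner 'while j >= 0' change loop of A
def changeLoop (dev numTend : Int) (j : Nat) : Int :=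
  if h : j ≤ 5 ∧ pvCoins.getD j 0 ≤ dev then
    changeLoop (dev - pvCoins.getD j 0) (numTend + 1) j
  else if j = 0 then numTend else changeLoop dev numTend (j - 1)
  termination_by (dev.toNat, j)
  decreasing_by
  · have h5 : (5:Int) ≤ pvCoins.getD j 0 := by
      obtain ⟨hj, -⟩ := h
      interval_cases j <;> simp [pvCoins]
    left; omega
  · right; omega

-- outer 'while contMax <= 200+x' loop of A, building formas / formasTend
def outerLoop (arreglo : List Int) (x contMax : Int) (formas formasTend : List Int) :
    List Int × List Int :=
  if contMax ≤ 200 + x then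
    outerLoop arreglo x (contMax + 5)
      (formas ++ [if 0 < (payLoop arreglo contMax 0 5).1 then (9999 : Int)
                  else (payLoop arreglo contMax 0 5).2])
      (formasTend ++ [changeLoop (contMax - x) 0 5])
  else (formas, formasTend)
  termination_by (200 + x - contMax + 5).toNat
  decreasing_by omega

-- final 'while p < len(formas)' min scan of A
def minLoop (formas formasTend : List Int) (p : Nat) (ans : Int) : Int :=
  if p < formas.length then
    minLoop formas formasTend (p + 1) (min ans (formas.getD p 0 + formasTend.getD p 0))
  else ans
  termination_by formas.length - p

def solve (arreglo : List Int) (x : Int) : Int :=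
  minLoop (outerLoop arreglo x x [] []).1 (outerLoop arreglo x x [] []).2 0
    ((outerLoop arreglo x x [] []).1.getD 0 0 + (outerLoop arreglo x x [] []).2.getD 0 0)

-- ===== PORT B =====
-- per-candidate cost: division-based greedy for the pay side (capped by stock) and change side
def costB (arreglo : List Int) (x paid : Int) : Int :=
  let coins : List Int := [5, 10, 20, 50, 100, 200]
  let s := ([5, 4, 3, 2, 1, 0] : List Int).foldl
    (fun (st : Int × Int) i =>
      let coin := PySem.List.pyGetD coins i 0
      let cnt := max 0 (min (PySem.Int.floordiv st.1 coin) (PySem.List.pyGetD arreglo i 0))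
      (st.1 - cnt * coin, st.2 + cnt)) (paid, 0)
  let pay := if 0 < s.1 then (9999 : Int) else s.2
  let c := ([200, 100, 50, 20, 10, 5] : List Int).foldl
    (fun (st : Int × Int) coin =>
      (st.1 + PySem.Int.floordiv st.2 coin, PySem.Int.mod st.2 coin)) (0, paid - x)
  pay + c.1

def solve_alt (arreglo : List Int) (x : Int) : Int :=
  (PySem.List.min?
    ((PySem.List.pyRange 0 41 1).map (fun k => costB arreglo x (x + 5 * k)))
    (fun y => y)).getD 0

-- ===== PRECONDITION & SPEC =====
-- Python A (and B) raises IndexError when len(arreglo) < 6 (it indexes arreglo[5..0]); nothing else is excluded.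
def Pre_solve (arreglo : List Int) (x : Int) : Prop := 6 ≤ arreglo.length
instance (arreglo : List Int) (x : Int) : Decidable (Pre_solve arreglo x) := by unfold Pre_solve; infer_instance
def pvWitness_solve : List Int × Int := ([2, 1, 0, 1, 0, 3], 37)

def Spec_solve (arreglo : List Int) (x : Int) (out : Int) : Prop := out = solve_alt arreglo x
instance (arreglo : List Int) (x : Int) (out : Int) : Decidable (Spec_solve arreglo x out) := by unfold Spec_solve; infer_instance

-- ===== CLAIM (what is proved, stated in full; the proofs are below) =====
def Claim_equal_solve : Prop := ∀ (arreglo : List Int) (x : Int), Dom_solve arreglo x → Pre_solve arreglo x → Spec_solve arreglo x (solve arreglo x)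


-- ===== LEMMAS AND PROOFS =====

-- per-iteration values of A's outer loop (proof-only helpers)
def payValA (arreglo : List Int) (x : Int) (j : Nat) : Int :=
  let r := payLoop arreglo (x + 5 * j) 0 5
  if 0 < r.1 then 9999 else r.2

def tendValA (j : Nat) : Int := changeLoop (5 * j) 0 5

def totalA (arreglo : List Int) (x : Int) (j : Nat) : Int :=
  payValA arreglo x j + tendValA j

lemma getD_set_lt (l : List Int) (i j : Nat) (v : Int) (h : j < i) :
    (l.set i v).getD j 0 = l.getD j 0 := by
  simp [List.getD_eq_getElem?_getD, Nat.ne_of_gt h]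

lemma getD_set_self' (l : List Int) (i : Nat) (v : Int) (h : i < l.length) :
    (l.set i v).getD i 0 = v := by
  simp [List.getD_eq_getElem?_getD, h]

lemma lt_length_of_getD_pos (l : List Int) (i : Nat) (h : 0 < l.getD i 0) : i < l.length := by
  by_contra hc
  push_neg at hc
  rw [List.getD_eq_getElem?_getD, List.getElem?_eq_none (by omega)] at h
  simp at h

lemma coin_ge5 (i : Nat) (h : i ≤ 5) : 5 ≤ pvCoins.getD i 0 := by
  interval_cases i <;> decide

lemma fdiv_sub_self (a b : Int) (hb : 0 < b) :
    PySem.Int.floordiv (a - b) b = PySem.Int.floordiv a b - 1 := by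
  rw [PySem.Int.floordiv_eq_ediv_of_pos hb, PySem.Int.floordiv_eq_ediv_of_pos hb]
  have : a - b = a + (-1) * b := by ring
  rw [this, Int.add_mul_ediv_right _ _ (ne_of_gt hb)]
  ring

lemma fdiv_nonpos_of_lt (a b : Int) (hb : 0 < b) (h : a < b) :
    PySem.Int.floordiv a b ≤ 0 := by
  have h1 : PySem.Int.floordiv a b < 1 := by
    rw [PySem.Int.floordiv_lt_iff_lt_mul hb]
    omega
  omega

lemma one_le_fdiv (a b : Int) (hb : 0 < b) (h : b ≤ a) :
    1 ≤ PySem.Int.floordiv a b := by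
  rw [PySem.Int.le_floordiv_iff_mul_le hb]
  omega

lemma mod_sub_self (a b : Int) (hb : 0 < b) :
    PySem.Int.mod (a - b) b = PySem.Int.mod a b := by
  rw [PySem.Int.mod_eq_emod_of_pos hb, PySem.Int.mod_eq_emod_of_pos hb, Int.sub_emod_right]

lemma mod_eq_self_of_lt (a b : Int) (hb : 0 < b) (h0 : 0 ≤ a) (h : a < b) :
    PySem.Int.mod a b = a := by
  rw [PySem.Int.mod_eq_emod_of_pos hb, Int.emod_eq_of_lt h0 h]

-- payLoop only reads copia at indices ≤ i
lemma payLoop_congr : ∀ (k : Nat) (copia copia2 : List Int) (acum n : Int) (i : Nat),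
    acum.toNat + i = k → (∀ j, j ≤ i → copia.getD j 0 = copia2.getD j 0) →
    payLoop copia acum n i = payLoop copia2 acum n i := by
  intro k
  induction k using Nat.strong_induction_on with
  | _ k IH =>
    intro copia copia2 acum n i hk hcong
    have hstock : copia.getD i 0 = copia2.getD i 0 := hcong i le_rfl
    rw [payLoop]
    conv_rhs => rw [payLoop]
    by_cases hc : i ≤ 5 ∧ 0 < copia.getD i 0 ∧ 0 ≤ acum - pvCoins.getD i 0
    · have hc2 : i ≤ 5 ∧ 0 < copia2.getD i 0 ∧ 0 ≤ acum - pvCoins.getD i 0 := by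
        rw [← hstock]; exact hc
      rw [dif_pos hc, dif_pos hc2, ← hstock]
      have h5 := coin_ge5 i hc.1
      have hlt1 : i < copia.length := lt_length_of_getD_pos _ _ hc.2.1
      have hlt2 : i < copia2.length := lt_length_of_getD_pos _ _ (hstock ▸ hc.2.1)
      apply IH ((acum - pvCoins.getD i 0).toNat + i) (by omega)
      · rfl
      · intro j hj
        rcases Nat.lt_or_ge j i with hji | hji
        · rw [getD_set_lt _ _ _ _ hji, getD_set_lt _ _ _ _ hji]
          exact hcong j hj
        · have : j = i := by omega
          subst this
          rw [getD_set_self' _ _ _ hlt1, getD_set_self' _ _ _ hlt2]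
    · have hc2 : ¬ (i ≤ 5 ∧ 0 < copia2.getD i 0 ∧ 0 ≤ acum - pvCoins.getD i 0) := by
        rw [← hstock]; exact hc
      rw [dif_neg hc, dif_neg hc2]
      by_cases hi : i = 0
      · simp [hi]
      · rw [if_neg hi, if_neg hi]
        apply IH (acum.toNat + (i - 1)) (by omega)
        · rfl
        · intro j hj
          exact hcong j (by omega)

-- A's one-coin-at-a-time loop at index i does cnt = max 0 (min (acum // coin) stock) steps at once
lemma pay_jump : ∀ (k : Nat) (copia : List Int) (acum n : Int) (i : Nat),
    acum.toNat = k → i ≤ 5 →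
    payLoop copia acum n i =
      (if i = 0 then
        (acum - max 0 (min (PySem.Int.floordiv acum (pvCoins.getD i 0)) (copia.getD i 0)) * pvCoins.getD i 0,
         n + max 0 (min (PySem.Int.floordiv acum (pvCoins.getD i 0)) (copia.getD i 0)))
      else
        payLoop copia
          (acum - max 0 (min (PySem.Int.floordiv acum (pvCoins.getD i 0)) (copia.getD i 0)) * pvCoins.getD i 0)
          (n + max 0 (min (PySem.Int.floordiv acum (pvCoins.getD i 0)) (copia.getD i 0)))
          (i - 1)) := by
  intro k
  induction k using Nat.strong_induction_on with
  | _ k IH =>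
    intro copia acum n i hk hi
    have h5 := coin_ge5 i hi
    set coin := pvCoins.getD i 0 with hcoin
    set stock := copia.getD i 0 with hstockdef
    rw [payLoop]
    by_cases hc : i ≤ 5 ∧ 0 < copia.getD i 0 ∧ 0 ≤ acum - pvCoins.getD i 0
    · rw [dif_pos hc]
      have hst : 0 < stock := hc.2.1
      have hac : coin ≤ acum := by have := hc.2.2; omega
      have hlt : i < copia.length := lt_length_of_getD_pos _ _ hc.2.1
      have hrec := IH (acum - coin).toNat (by omega) (copia.set i (stock - 1)) (acum - coin) (n + 1) i rfl hi
      rw [getD_set_self' _ _ _ hlt] at hrec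
      have hd1 : PySem.Int.floordiv (acum - coin) coin = PySem.Int.floordiv acum coin - 1 :=
        fdiv_sub_self _ _ (by omega)
      have hd2 : 1 ≤ PySem.Int.floordiv acum coin := one_le_fdiv _ _ (by omega) hac
      rw [hd1] at hrec
      have hcnt : max 0 (min (PySem.Int.floordiv acum coin - 1) (stock - 1)) =
          max 0 (min (PySem.Int.floordiv acum coin) stock) - 1 := by omega
      rw [hcnt] at hrec
      rw [hrec]
      set cnt := max 0 (min (PySem.Int.floordiv acum coin) stock) with hcntdef
      have harith1 : acum - coin - (cnt - 1) * coin = acum - cnt * coin := by ring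
      have harith2 : n + 1 + (cnt - 1) = n + cnt := by ring
      rw [harith1, harith2]
      by_cases hi0 : i = 0
      · rw [if_pos hi0, if_pos hi0]
      · rw [if_neg hi0, if_neg hi0]
        apply payLoop_congr ((acum - cnt * coin).toNat + (i - 1)) _ _ _ _ _ rfl
        intro j hj
        exact getD_set_lt _ _ _ _ (by omega)
    · rw [dif_neg hc]
      have hcnt0 : max 0 (min (PySem.Int.floordiv acum coin) stock) = 0 := by
        rcases not_and_or.mp hc with h | h
        · omega
        rcases not_and_or.mp h with h | h
        · push_neg at h
          omega
        · push_neg at h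
          have := fdiv_nonpos_of_lt acum coin (by omega) (by omega)
          omega
      rw [hcnt0]
      by_cases hi0 : i = 0
      · rw [if_pos hi0, if_pos hi0]
        simp
      · rw [if_neg hi0, if_neg hi0]
        simp
-- A's change loop at index j does dev // coin steps at once (dev stays nonnegative)
lemma change_jump : ∀ (k : Nat) (dev n : Int) (j : Nat),
    dev.toNat = k → j ≤ 5 → 0 ≤ dev →
    changeLoop dev n j =
      (if j = 0 then n + PySem.Int.floordiv dev (pvCoins.getD j 0)
       else changeLoop (PySem.Int.mod dev (pvCoins.getD j 0))
              (n + PySem.Int.floordiv dev (pvCoins.getD j 0)) (j - 1)) := by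
  intro k
  induction k using Nat.strong_induction_on with
  | _ k IH =>
    intro dev n j hk hj hdev
    have h5 := coin_ge5 j hj
    set coin := pvCoins.getD j 0 with hcoin
    rw [changeLoop]
    by_cases hc : j ≤ 5 ∧ pvCoins.getD j 0 ≤ dev
    · rw [dif_pos hc]
      have hac : coin ≤ dev := hc.2
      have hrec := IH (dev - coin).toNat (by omega) (dev - coin) (n + 1) j rfl hj (by omega)
      rw [fdiv_sub_self _ _ (by omega), mod_sub_self _ _ (by omega)] at hrec
      have harith : n + 1 + (PySem.Int.floordiv dev coin - 1) = n + PySem.Int.floordiv dev coin := by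
        ring
      rw [harith] at hrec
      exact hrec
    · rw [dif_neg hc]
      have hlt : dev < coin := by
        rcases not_and_or.mp hc with h | h
        · omega
        · push_neg at h; omega
      have hd0 : PySem.Int.floordiv dev coin = 0 := by
        have h1 := fdiv_nonpos_of_lt dev coin (by omega) hlt
        have h2 : 0 ≤ PySem.Int.floordiv dev coin := by
          rw [PySem.Int.floordiv_eq_ediv_of_pos (by omega)]
          exact Int.ediv_nonneg hdev (by omega)
        omega
      have hm : PySem.Int.mod dev coin = dev := mod_eq_self_of_lt _ _ (by omega) hdev hlt
      by_cases hj0 : j = 0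
      · rw [if_pos hj0, if_pos hj0, hd0]
        simp
      · rw [if_neg hj0, if_neg hj0, hd0, hm]
        simp

lemma pay_jump' (copia : List Int) (acum n : Int) (i : Nat) (hi : i ≤ 5) :
    payLoop copia acum n i =
      (if i = 0 then
        (acum - max 0 (min (PySem.Int.floordiv acum (pvCoins.getD i 0)) (copia.getD i 0)) * pvCoins.getD i 0,
         n + max 0 (min (PySem.Int.floordiv acum (pvCoins.getD i 0)) (copia.getD i 0)))
      else
        payLoop copia
          (acum - max 0 (min (PySem.Int.floordiv acum (pvCoins.getD i 0)) (copia.getD i 0)) * pvCoins.getD i 0)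
          (n + max 0 (min (PySem.Int.floordiv acum (pvCoins.getD i 0)) (copia.getD i 0)))
          (i - 1)) :=
  pay_jump acum.toNat copia acum n i rfl hi

lemma change_jump' (dev n : Int) (j : Nat) (hj : j ≤ 5) (hdev : 0 ≤ dev) :
    changeLoop dev n j =
      (if j = 0 then n + PySem.Int.floordiv dev (pvCoins.getD j 0)
       else changeLoop (PySem.Int.mod dev (pvCoins.getD j 0))
              (n + PySem.Int.floordiv dev (pvCoins.getD j 0)) (j - 1)) :=
  change_jump dev.toNat dev n j rfl hj hdev

-- per-candidate equality: B's division-based cost equals A's per-iteration value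
lemma cost_eq (arreglo : List Int) (x : Int) (j : Nat) :
    costB arreglo x (x + 5 * (j : Int)) = totalA arreglo x j := by
  have g5 : pvCoins.getD 5 0 = 200 := rfl
  have g4 : pvCoins.getD 4 0 = 100 := rfl
  have g3 : pvCoins.getD 3 0 = 50 := rfl
  have g2 : pvCoins.getD 2 0 = 20 := rfl
  have g1 : pvCoins.getD 1 0 = 10 := rfl
  have g0 : pvCoins.getD 0 0 = 5 := rfl
  have hAx : x + 5 * (j : Int) - x = 5 * (j : Int) := by ring
  have m0 : (0 : Int) ≤ 5 * (j : Int) := by positivity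
  simp only [costB, totalA, payValA, tendValA, List.foldl_cons, List.foldl_nil,
    PySem.List.pyGetD_ofNat', hAx]
  rw [pay_jump' _ _ _ 5 (by omega), g5]
  rw [if_neg (by omega : (5:Nat) ≠ 0)]
  rw [pay_jump' _ _ _ 4 (by omega), g4]
  rw [if_neg (by omega : (4:Nat) ≠ 0)]
  rw [pay_jump' _ _ _ 3 (by omega), g3]
  rw [if_neg (by omega : (3:Nat) ≠ 0)]
  rw [pay_jump' _ _ _ 2 (by omega), g2]
  rw [if_neg (by omega : (2:Nat) ≠ 0)]
  rw [pay_jump' _ _ _ 1 (by omega), g1]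
  rw [if_neg (by omega : (1:Nat) ≠ 0)]
  rw [pay_jump' _ _ _ 0 (by omega), g0]
  rw [if_pos rfl]
  rw [change_jump' _ _ 5 (by omega) m0, g5]
  rw [if_neg (by omega : (5:Nat) ≠ 0)]
  rw [change_jump' _ _ 4 (by omega) (PySem.Int.mod_nonneg _ (by omega)), g4]
  rw [if_neg (by omega : (4:Nat) ≠ 0)]
  rw [change_jump' _ _ 3 (by omega) (PySem.Int.mod_nonneg _ (by omega)), g3]
  rw [if_neg (by omega : (3:Nat) ≠ 0)]
  rw [change_jump' _ _ 2 (by omega) (PySem.Int.mod_nonneg _ (by omega)), g2]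
  rw [if_neg (by omega : (2:Nat) ≠ 0)]
  rw [change_jump' _ _ 1 (by omega) (PySem.Int.mod_nonneg _ (by omega)), g1]
  rw [if_neg (by omega : (1:Nat) ≠ 0)]
  rw [change_jump' _ _ 0 (by omega) (PySem.Int.mod_nonneg _ (by omega)), g0]
  rw [if_pos rfl]
  have c5 : ([5, 10, 20, 50, 100, 200] : List Int).getD 5 0 = 200 := rfl
  have c4 : ([5, 10, 20, 50, 100, 200] : List Int).getD 4 0 = 100 := rfl
  have c3 : ([5, 10, 20, 50, 100, 200] : List Int).getD 3 0 = 50 := rfl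
  have c2 : ([5, 10, 20, 50, 100, 200] : List Int).getD 2 0 = 20 := rfl
  have c1 : ([5, 10, 20, 50, 100, 200] : List Int).getD 1 0 = 10 := rfl
  have c0 : ([5, 10, 20, 50, 100, 200] : List Int).getD 0 0 = 5 := rfl
  rw [c5, c4, c3, c2, c1, c0]

lemma outer_eq (arreglo : List Int) (x : Int) :
    ∀ (m jj : Nat) (f ft : List Int), jj + m = 41 →
    outerLoop arreglo x (x + 5 * jj) f ft =
      (f ++ (List.range m).map (fun k => payValA arreglo x (jj + k)),
       ft ++ (List.range m).map (fun k => tendValA (jj + k))) := by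
  intro m
  induction m with
  | zero =>
    intro jj f ft hjj
    rw [outerLoop]
    rw [if_neg (by omega)]
    simp
  | succ m IH =>
    intro jj f ft hjj
    have hL : ∀ (g : Nat → Int), g jj :: (List.range m).map (fun k => g (jj + 1 + k)) =
        (List.range (m + 1)).map (fun k => g (jj + k)) := by
      intro g
      rw [List.range_succ_eq_map, List.map_cons, List.map_map]
      congr 1
      apply List.map_congr_left
      intro k _
      simp only [Function.comp_apply, Nat.succ_eq_add_one]
      congr 1
      omega
    rw [outerLoop]
    rw [if_pos (by omega)]
    have hstep : x + 5 * (jj : Int) + 5 = x + 5 * ((jj + 1 : Nat) : Int) := by push_cast; ring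
    have hdev : x + 5 * (jj : Int) - x = 5 * (jj : Int) := by ring
    rw [hstep, hdev]
    rw [IH (jj + 1) _ _ (by omega)]
    rw [Prod.mk.injEq]
    refine ⟨?_, ?_⟩
    · rw [List.append_assoc, ← hL (fun k => payValA arreglo x k)]
      simp [payValA]
    · rw [List.append_assoc, ← hL (fun k => tendValA k)]
      simp [tendValA]

lemma min_eq (pV tV : Nat → Int) :
    ∀ (q p : Nat) (ans : Int), p + q = 41 →
    minLoop ((List.range 41).map pV) ((List.range 41).map tV) p ans =
      List.foldl min ans (((List.range 41).map (fun j => pV j + tV j)).drop p) := by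
  intro q
  induction q with
  | zero =>
    intro p ans hp
    rw [minLoop]
    rw [if_neg (by simp; omega)]
    rw [List.drop_eq_nil_of_le (by simp; omega)]
    rfl
  | succ q IH =>
    intro p ans hp
    have hp41 : p < 41 := by omega
    rw [minLoop]
    rw [if_pos (by simp; omega)]
    have hget : (List.map pV (List.range 41)).getD p 0 + (List.map tV (List.range 41)).getD p 0 =
        pV p + tV p := by
      simp [List.getD_eq_getElem?_getD, List.getElem?_map, List.getElem?_range hp41]
    rw [hget, IH (p + 1) _ (by omega)]
    have hdrop : (((List.range 41).map (fun j => pV j + tV j)).drop p) =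
        (pV p + tV p) :: (((List.range 41).map (fun j => pV j + tV j)).drop (p + 1)) := by
      rw [← List.getElem_cons_drop (by simp; omega)]
      simp
    rw [hdrop, List.foldl_cons]

lemma range41_cons : List.range 41 = 0 :: (List.range 40).map Nat.succ := by
  rw [show (41 : Nat) = 40 + 1 from rfl, List.range_succ_eq_map]

-- ===== VERDICT (by name: the statement is the Claim_ definition above) =====
theorem solve_spec : Claim_equal_solve := by
  intro arreglo x _ _
  unfold Spec_solve solve solve_alt
  have houter := outer_eq arreglo x 41 0 [] [] (by omega)
  rw [show x + 5 * ((0 : Nat) : Int) = x by push_cast; ring] at houter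
  simp only [Nat.zero_add, List.nil_append] at houter
  rw [houter]
  simp only
  rw [min_eq (fun k => payValA arreglo x k) (fun k => tendValA k) 41 0 _ (by omega)]
  rw [List.drop_zero]
  have hget : (List.map (fun k => payValA arreglo x k) (List.range 41)).getD 0 0 +
      (List.map (fun k => tendValA k) (List.range 41)).getD 0 0 =
      payValA arreglo x 0 + tendValA 0 := by
    simp [List.getD_eq_getElem?_getD]
  rw [hget]
  -- B side
  rw [PySem.List.pyRange_zero 41]
  rw [show ((41 : Int)).toNat = 41 from rfl]
  rw [List.map_map]
  have hmap : (List.range 41).map ((fun k => costB arreglo x (x + 5 * k)) ∘ (fun k : Nat => (k : Int))) =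
      (List.range 41).map (fun k => payValA arreglo x k + tendValA k) := by
    apply List.map_congr_left
    intro k _
    have := cost_eq arreglo x k
    simpa [totalA] using this
  rw [hmap]
  conv_rhs => rw [range41_cons]
  rw [List.map_cons, PySem.List.min?_id_cons, Option.getD_some]
  conv_lhs => rw [range41_cons]
  rw [List.map_cons, List.foldl_cons, min_self]
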